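-- pv_equiv track=rewrite | github.com/M1c17/ICS_and_Programming_Using_Python | Week6_Algorithmic_Complexity/Problem_Set_6/Pset6 - P5.py | newsearch
-- ===== SOURCE A (Python) =====
-- def newsearch(L, e):
--     size = len(L)
--     for i in range(size):
--         if L[size-i-1] == e:
--             return True
--         if L[i] < e:
--             return False
--     return False
-- ===== SOURCE B (Python) =====
-- def newsearch(L, e):
--     n = len(L)
--     eq = next((i for i in range(n) if L[n - 1 - i] == e), None)
--     lt = next((i for i in range(n) if L[i] < e), None)
--     if eq is None:
--         return False
--     return lt is None or eq <= lt
-- ===== Notes on version B (the rewrite author's own statement) =====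
-- stated objective: alternative
-- what changed: Replaces the single interleaved dual-end early-exit loop by two independent first-hit scans (first back-to-front index equal to e, first front index below e) combined by one final comparison with not-found treated as infinity.
import Mathlib
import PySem

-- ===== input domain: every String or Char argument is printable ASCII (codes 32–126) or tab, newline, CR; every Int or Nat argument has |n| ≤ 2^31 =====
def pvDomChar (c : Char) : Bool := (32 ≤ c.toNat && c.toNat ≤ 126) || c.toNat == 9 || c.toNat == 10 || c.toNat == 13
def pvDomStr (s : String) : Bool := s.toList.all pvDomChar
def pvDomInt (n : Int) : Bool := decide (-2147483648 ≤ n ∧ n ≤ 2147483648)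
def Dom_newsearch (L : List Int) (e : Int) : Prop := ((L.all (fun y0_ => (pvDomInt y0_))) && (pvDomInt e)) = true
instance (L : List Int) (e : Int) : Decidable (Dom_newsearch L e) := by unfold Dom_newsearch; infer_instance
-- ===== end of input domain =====

-- B replaces A's interleaved dual-end early-exit loop by two independent first-hit
-- scans combined with one final comparison (objective: alternative decomposition; same cost).

-- ===== PORT A =====
-- the loop 'for i in range(size): …' with its two early returns; indices are always in
-- range, so pyGetD with default 0 is exact (Python never raises here)
def newsearchGo (L : List Int) (e size : Int) : List Int → Bool
  | [] => false
  | i :: rest =>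
    if PySem.List.pyGetD L (size - i - 1) 0 = e then true
    else if PySem.List.pyGetD L i 0 < e then false
    else newsearchGo L e size rest

def newsearch (L : List Int) (e : Int) : Bool :=
  newsearchGo L e (L.length : Int) (PySem.List.pyRange 0 (L.length : Int) 1)

-- ===== PORT B =====
-- next((i for i in range(n) if p(i)), None): first index in the range satisfying p
def firstIdx? (p : Int → Bool) : List Int → Option Int
  | [] => none
  | i :: rest => if p i then some i else firstIdx? p rest

def newsearch_alt (L : List Int) (e : Int) : Bool :=
  let n : Int := (L.length : Int)
  let idxs := PySem.List.pyRange 0 n 1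
  let eq := firstIdx? (fun i => PySem.List.pyGetD L (n - 1 - i) 0 == e) idxs
  let lt := firstIdx? (fun i => decide (PySem.List.pyGetD L i 0 < e)) idxs
  match eq, lt with
  | none, _ => false
  | some _, none => true
  | some a, some b => decide (a ≤ b)

-- ===== PRECONDITION & SPEC =====
def Spec_newsearch (L : List Int) (e : Int) (out : Bool) : Prop := out = newsearch_alt L e
instance (L : List Int) (e : Int) (out : Bool) : Decidable (Spec_newsearch L e out) := by unfold Spec_newsearch; infer_instance

-- ===== CLAIM (what is proved, stated in full; the proofs are below) =====
def Claim_equal_newsearch : Prop := ∀ (L : List Int) (e : Int), Dom_newsearch L e → Spec_newsearch L e (newsearch L e)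

-- ===== LEMMAS AND PROOFS =====

lemma firstIdx?_mem (p : Int → Bool) : ∀ (xs : List Int) (a : Int), firstIdx? p xs = some a → a ∈ xs := by
  intro xs
  induction xs with
  | nil => intro a h; simp [firstIdx?] at h
  | cons i rest ih =>
    intro a h
    by_cases hp : p i
    · simp [firstIdx?, hp] at h; simp [h]
    · simp [firstIdx?, hp] at h
      exact List.mem_cons_of_mem _ (ih a h)

-- the loop over a strictly increasing index list equals the two-scan comparison
lemma go_eq_scans (L : List Int) (e size : Int) :
    ∀ xs : List Int, xs.Pairwise (· < ·) →
      newsearchGo L e size xs =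
        match firstIdx? (fun i => PySem.List.pyGetD L (size - i - 1) 0 == e) xs,
              firstIdx? (fun i => decide (PySem.List.pyGetD L i 0 < e)) xs with
        | none, _ => false
        | some _, none => true
        | some a, some b => decide (a ≤ b) := by
  intro xs hxs
  induction xs with
  | nil => simp [newsearchGo, firstIdx?]
  | cons i rest ih =>
    have hlt : ∀ b ∈ rest, i < b := fun b hb => (List.pairwise_cons.mp hxs).1 b hb
    have hrest := ih (List.pairwise_cons.mp hxs).2
    by_cases hp : PySem.List.pyGetD L (size - i - 1) 0 = e
    · -- loop returns True; eq = i, every lt candidate is ≥ i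
      simp only [newsearchGo, firstIdx?, hp, if_true, beq_self_eq_true]
      by_cases hq : PySem.List.pyGetD L i 0 < e
      · simp [hq]
      · simp only [hq, decide_false, Bool.false_eq_true, if_false]
        cases hlt' : firstIdx? (fun i => decide (PySem.List.pyGetD L i 0 < e)) rest with
        | none => simp
        | some b =>
          have : i < b := hlt b (firstIdx?_mem _ rest b hlt')
          simp [le_of_lt this]
    · by_cases hq : PySem.List.pyGetD L i 0 < e
      · -- loop returns False; lt = i, every eq candidate is > i
        cases heq : firstIdx? (fun i => PySem.List.pyGetD L (size - i - 1) 0 == e) rest with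
        | none => simp [newsearchGo, firstIdx?, hp, hq, heq]
        | some a =>
          have hia : i < a := hlt a (firstIdx?_mem _ rest a heq)
          simp [newsearchGo, firstIdx?, hp, hq, heq, not_le.mpr hia]
      · simp [newsearchGo, firstIdx?, hp, hq, hrest]

-- the two index expressions size - i - 1 and n - 1 - i coincide
lemma pred_eq (L : List Int) (e : Int) :
    (fun i => PySem.List.pyGetD L ((L.length : Int) - i - 1) 0 == e) =
      (fun i => PySem.List.pyGetD L ((L.length : Int) - 1 - i) 0 == e) := by
  funext i
  have h : (L.length : Int) - i - 1 = (L.length : Int) - 1 - i := by ring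
  rw [h]

-- ===== VERDICT (by name: the statement is the Claim_ definition above) =====
theorem newsearch_spec : Claim_equal_newsearch := by
  intro L e _
  unfold Spec_newsearch newsearch newsearch_alt
  rw [go_eq_scans L e (L.length : Int) _ (PySem.List.pairwise_lt_pyRange_one 0 (L.length : Int))]
  rw [pred_eq L e]
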